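-- pv_equiv track=rewrite | github.com/tengesser/planner | examples/gossip/gossip-gen.py | genEvents
-- ===== SOURCE A (Python) =====
-- from itertools import product
--
-- def genEvents(n):
--   result = ''
--   events = list(product(*[[0,1,2] for i in range(n)]))
--   for i in range(len(events)):
--     e = events[i]
--     foo = '(and\n'
--     for s in range(n):
--       if e[s]== 0: foo += '(knows ?a1 (not (secret-true s%d)))\n'%(s+1)
--       if e[s]== 1: foo += '(knows ?a1 (secret-true s%d))\n'%(s+1)
--       if e[s]== 2: foo += '(not (or (knows ?a1 (secret-true s%d)) (knows ?a1 (not (secret-true s%d)))))\n'%(s+1,s+1)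
--     foo += ')'
--     result += '''
-- (:event-designated kn%da1
--    :precondition %s
--    :effect (and))''' % (i,foo)
--   return result
-- ===== SOURCE B (Python) =====
-- def genEvents(n):
--   # Same PDDL event blocks, but the i-th precondition is decoded from the
--   # ternary digits of i (built back-to-front, least-significant digit = last
--   # secret), instead of materializing the itertools.product list.
--   m = n if n > 0 else 0
--   blocks = []
--   for i in range(3 ** m):
--     body = ')'
--     q = i
--     for s in range(m, 0, -1):
--       d = q % 3
--       q //= 3
--       if d == 0:
--         line = '(knows ?a1 (not (secret-true s%d)))\n' % s
--       elif d == 1: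
--         line = '(knows ?a1 (secret-true s%d))\n' % s
--       else:
--         line = '(not (or (knows ?a1 (secret-true s%d)) (knows ?a1 (not (secret-true s%d)))))\n' % (s, s)
--       body = line + body
--     blocks.append('\n(:event-designated kn%da1\n   :precondition (and\n%s\n   :effect (and))' % (i, body))
--   return ''.join(blocks)
-- ===== Notes on version B (the rewrite author's own statement) =====
-- stated objective: alternative
-- what changed: B drops itertools.product and the materialized list of tuples: it loops a counter over all combinations and decodes each precondition from the counter's ternary digits, building the precondition string back-to-front while repeatedly dividing the counter.
import Mathlib
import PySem

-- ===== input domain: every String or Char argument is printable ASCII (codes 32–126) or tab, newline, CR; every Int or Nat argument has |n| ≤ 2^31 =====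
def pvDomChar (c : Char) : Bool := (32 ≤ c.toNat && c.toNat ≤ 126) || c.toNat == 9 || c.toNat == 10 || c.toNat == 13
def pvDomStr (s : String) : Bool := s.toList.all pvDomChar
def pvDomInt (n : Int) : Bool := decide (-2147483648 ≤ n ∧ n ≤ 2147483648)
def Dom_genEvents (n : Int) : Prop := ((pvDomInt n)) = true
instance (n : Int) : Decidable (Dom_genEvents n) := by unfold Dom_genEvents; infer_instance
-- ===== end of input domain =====

-- B replaces the materialized itertools.product list by a counter whose base-3
-- digits are decoded per block, building each precondition back-to-front (objective: alternative).

-- ===== PORT A =====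
-- list(product(*[[0,1,2] for i in range(n)])): the standard itertools.product
-- recurrence result = [t+[y] for t in result for y in pool], once per pool;
-- range(n) for Int n has max(n,0) elements, exactly List.range n.toNat.
def pvProdA (n : Nat) : List (List Int) :=
  (List.range n).foldl
    (fun acc _ => acc.flatMap (fun t => ([0, 1, 2] : List Int).map (fun y => t ++ [y]))) [[]]

def genEvents (n : Int) : String :=
  let events := pvProdA n.toNat
  (List.range events.length).foldl (fun result (i : Nat) =>
    -- e = events[i]; always in range (i < len(events)), so getD is exact here
    let e := (PySem.List.pyGet? events (i : Int)).getD []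
    let foo := (List.range n.toNat).foldl (fun foo (s : Nat) =>
      -- e[s]; always in range (s < n = len(e)), so getD is exact here
      let d := (PySem.List.pyGet? e (s : Int)).getD (-1)
      let foo := if d = 0 then foo ++ "(knows ?a1 (not (secret-true s" ++ PySem.Int.toStr ((s : Int) + 1) ++ ")))\n" else foo
      let foo := if d = 1 then foo ++ "(knows ?a1 (secret-true s" ++ PySem.Int.toStr ((s : Int) + 1) ++ "))\n" else foo
      let foo := if d = 2 then foo ++ "(not (or (knows ?a1 (secret-true s" ++ PySem.Int.toStr ((s : Int) + 1) ++ ")) (knows ?a1 (not (secret-true s" ++ PySem.Int.toStr ((s : Int) + 1) ++ ")))))\n" else foo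
      foo) "(and\n"
    let foo := foo ++ ")"
    result ++ "\n(:event-designated kn" ++ PySem.Int.toStr (i : Int) ++ "a1\n   :precondition " ++ foo ++ "\n   :effect (and))") ""

-- ===== PORT B =====
-- the three line templates of Source B (q % 3 is a Nat since q ≥ 0 throughout)
def pvLineB (s : Nat) (d : Nat) : String :=
  if d = 0 then "(knows ?a1 (not (secret-true s" ++ PySem.Int.toStr (s : Int) ++ ")))\n"
  else if d = 1 then "(knows ?a1 (secret-true s" ++ PySem.Int.toStr (s : Int) ++ "))\n"
  else "(not (or (knows ?a1 (secret-true s" ++ PySem.Int.toStr (s : Int) ++ ")) (knows ?a1 (not (secret-true s" ++ PySem.Int.toStr (s : Int) ++ ")))))\n"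

-- Source B's 'for s in range(m, 0, -1): d = q % 3; q //= 3; body = line + body'
def pvBodyB : Nat → Nat → String → String
  | 0, _, body => body
  | s + 1, q, body => pvBodyB s (q / 3) (pvLineB (s + 1) (q % 3) ++ body)

def genEvents_alt (n : Int) : String :=
  let m := n.toNat  -- m = n if n > 0 else 0
  (List.range (3 ^ m)).foldl (fun res (i : Nat) =>
    res ++ "\n(:event-designated kn" ++ PySem.Int.toStr (i : Int) ++ "a1\n   :precondition (and\n"
        ++ pvBodyB m i ")" ++ "\n   :effect (and))") ""

-- ===== PRECONDITION & SPEC =====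
def Spec_genEvents (n : Int) (out : String) : Prop := out = genEvents_alt n
instance (n : Int) (out : String) : Decidable (Spec_genEvents n out) := by unfold Spec_genEvents; infer_instance

-- ===== CLAIM (what is proved, stated in full; the proofs are below) =====
def Claim_equal_genEvents : Prop := ∀ (n : Int), Dom_genEvents n → Spec_genEvents n (genEvents n)

-- ===== LEMMAS AND PROOFS =====

-- base-3 digits of i, most significant first (m digits)
def pvDig : Nat → Nat → List Int
  | 0, _ => []
  | m + 1, i => pvDig m (i / 3) ++ [((i % 3 : Nat) : Int)]

-- concatenation of the m precondition lines of combination i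
def pvLines : Nat → Nat → String
  | 0, _ => ""
  | m + 1, i => pvLines m (i / 3) ++ pvLineB (m + 1) (i % 3)

theorem pvDig_length (m i : Nat) : (pvDig m i).length = m := by
  induction m generalizing i with
  | zero => rfl
  | succ m ih => simp [pvDig, ih]

theorem range_mul3 (k : Nat) :
    List.range (k * 3) = (List.range k).flatMap (fun q => [q * 3, q * 3 + 1, q * 3 + 2]) := by
  induction k with
  | zero => rfl
  | succ k ih =>
    have h : (k + 1) * 3 = k * 3 + 1 + 1 + 1 := by ring
    rw [h, List.range_succ, List.range_succ, List.range_succ, ih, List.range_succ]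
    simp [List.flatMap_append]

theorem pvProdA_eq (m : Nat) : pvProdA m = (List.range (3 ^ m)).map (pvDig m) := by
  induction m with
  | zero => rfl
  | succ m ih =>
    have h1 : pvProdA (m + 1)
        = (pvProdA m).flatMap (fun t => ([0, 1, 2] : List Int).map (fun y => t ++ [y])) := by
      simp [pvProdA, List.range_succ]
    have h2 : (3 : Nat) ^ (m + 1) = 3 ^ m * 3 := by ring
    rw [h1, ih, h2, range_mul3, List.map_flatMap, List.flatMap_map]
    apply List.flatMap_congr
    intro q _
    have d0 : (q * 3) / 3 = q ∧ (q * 3) % 3 = 0 := by omega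
    have d1 : (q * 3 + 1) / 3 = q ∧ (q * 3 + 1) % 3 = 1 := by omega
    have d2 : (q * 3 + 2) / 3 = q ∧ (q * 3 + 2) % 3 = 2 := by omega
    simp [pvDig, d0.1, d1.1, d2.1]

theorem pvBodyB_eq (m : Nat) : ∀ (i : Nat) (body : String),
    pvBodyB m i body = pvLines m i ++ body := by
  induction m with
  | zero => intro i body; simp [pvBodyB, pvLines]
  | succ m ih =>
    intro i body
    rw [pvBodyB, ih, pvLines, String.append_assoc]

-- A's inner loop over range m, reading the digit list pvDig m i, appends pvLines m i
theorem innerA_eq (m : Nat) : ∀ (i : Nat) (acc : String),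
    (List.range m).foldl (fun foo (s : Nat) =>
      let d := (PySem.List.pyGet? (pvDig m i) (s : Int)).getD (-1)
      let foo := if d = 0 then foo ++ "(knows ?a1 (not (secret-true s" ++ PySem.Int.toStr ((s : Int) + 1) ++ ")))\n" else foo
      let foo := if d = 1 then foo ++ "(knows ?a1 (secret-true s" ++ PySem.Int.toStr ((s : Int) + 1) ++ "))\n" else foo
      let foo := if d = 2 then foo ++ "(not (or (knows ?a1 (secret-true s" ++ PySem.Int.toStr ((s : Int) + 1) ++ ")) (knows ?a1 (not (secret-true s" ++ PySem.Int.toStr ((s : Int) + 1) ++ ")))))\n" else foo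
      foo) acc = acc ++ pvLines m i := by
  induction m with
  | zero => intro i acc; simp [pvLines]
  | succ m ih =>
    intro i acc
    rw [List.range_succ, List.foldl_append]
    have hcongr : (List.range m).foldl (fun foo (s : Nat) =>
        let d := (PySem.List.pyGet? (pvDig (m + 1) i) (s : Int)).getD (-1)
        let foo := if d = 0 then foo ++ "(knows ?a1 (not (secret-true s" ++ PySem.Int.toStr ((s : Int) + 1) ++ ")))\n" else foo
        let foo := if d = 1 then foo ++ "(knows ?a1 (secret-true s" ++ PySem.Int.toStr ((s : Int) + 1) ++ "))\n" else foo
        let foo := if d = 2 then foo ++ "(not (or (knows ?a1 (secret-true s" ++ PySem.Int.toStr ((s : Int) + 1) ++ ")) (knows ?a1 (not (secret-true s" ++ PySem.Int.toStr ((s : Int) + 1) ++ ")))))\n" else foo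
        foo) acc
        = (List.range m).foldl (fun foo (s : Nat) =>
        let d := (PySem.List.pyGet? (pvDig m (i / 3)) (s : Int)).getD (-1)
        let foo := if d = 0 then foo ++ "(knows ?a1 (not (secret-true s" ++ PySem.Int.toStr ((s : Int) + 1) ++ ")))\n" else foo
        let foo := if d = 1 then foo ++ "(knows ?a1 (secret-true s" ++ PySem.Int.toStr ((s : Int) + 1) ++ "))\n" else foo
        let foo := if d = 2 then foo ++ "(not (or (knows ?a1 (secret-true s" ++ PySem.Int.toStr ((s : Int) + 1) ++ ")) (knows ?a1 (not (secret-true s" ++ PySem.Int.toStr ((s : Int) + 1) ++ ")))))\n" else foo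
        foo) acc := by
      apply PySem.List.foldl_congr_mem
      intro acc' s hs
      have hs' : s < m := List.mem_range.mp hs
      have hget : PySem.List.pyGet? (pvDig (m + 1) i) (s : Int)
          = PySem.List.pyGet? (pvDig m (i / 3)) (s : Int) := by
        rw [PySem.List.pyGet?_natCast, PySem.List.pyGet?_natCast, pvDig,
          List.getElem?_append_left (by rw [pvDig_length]; exact hs')]
      rw [hget]
    rw [hcongr, ih]
    have hlast : (pvDig (m + 1) i)[m]?.getD (-1) = ((i % 3 : Nat) : Int) := by
      rw [pvDig, List.getElem?_append_right (by rw [pvDig_length])]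
      simp [pvDig_length]
    have h3 : i % 3 = 0 ∨ i % 3 = 1 ∨ i % 3 = 2 := by omega
    rcases h3 with h | h | h <;>
      simp [hlast, h, pvLines, pvLineB, String.append_assoc, Nat.cast_add]

theorem genEvents_eq_alt (n : Int) : genEvents n = genEvents_alt n := by
  simp only [genEvents, genEvents_alt, pvProdA_eq, List.length_map, List.length_range]
  apply PySem.List.foldl_congr_mem
  intro acc i hi
  have hi' : i < 3 ^ n.toNat := List.mem_range.mp hi
  have hget : (PySem.List.pyGet? ((List.range (3 ^ n.toNat)).map (pvDig n.toNat)) (i : Int)).getD []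
      = pvDig n.toNat i := by
    rw [PySem.List.pyGet?_natCast]
    simp [List.getElem?_range hi']
  rw [hget, innerA_eq, pvBodyB_eq]
  have hlit : "a1\n   :precondition " ++ "(and\n" = "a1\n   :precondition (and\n" := rfl
  simp only [String.append_assoc]
  rw [← hlit]
  simp only [String.append_assoc]

-- ===== VERDICT (by name: the statement is the Claim_ definition above) =====
theorem genEvents_spec : Claim_equal_genEvents := by
  intro n _
  unfold Spec_genEvents
  exact genEvents_eq_alt n
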